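-- pv_equiv track=rewrite | github.com/code-study-classes/python-basics-YaroslavDudin | practice_package/loops.py | count_vowel_triplets
-- ===== SOURCE A (Python) =====
-- def count_vowel_triplets(text):
--     text = text.lower()
--     count = 0
--     vowels = "aeiouy"
--     for i in range(len(text) - 2):
--         if (text[i] in vowels and
--             text[i + 1] in vowels and
--             text[i + 2] in vowels):
--             count += 1
--     return count
-- ===== SOURCE B (Python) =====
-- def count_vowel_triplets(text):
--     vowels = "aeiouy"
--     total = 0
--     run = 0
--     for ch in text.lower():
--         if ch in vowels:
--             run += 1
--         else:
--             total += max(0, run - 2)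
--             run = 0
--     return total + max(0, run - 2)
-- ===== Notes on version B (the rewrite author's own statement) =====
-- stated objective: alternative
-- what changed: Replaces A's overlapping three-index window membership test with a single pass that maintains the current consecutive-vowel run length and adds max(0, run-2) when each run ends (and once after the loop).
import Mathlib
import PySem

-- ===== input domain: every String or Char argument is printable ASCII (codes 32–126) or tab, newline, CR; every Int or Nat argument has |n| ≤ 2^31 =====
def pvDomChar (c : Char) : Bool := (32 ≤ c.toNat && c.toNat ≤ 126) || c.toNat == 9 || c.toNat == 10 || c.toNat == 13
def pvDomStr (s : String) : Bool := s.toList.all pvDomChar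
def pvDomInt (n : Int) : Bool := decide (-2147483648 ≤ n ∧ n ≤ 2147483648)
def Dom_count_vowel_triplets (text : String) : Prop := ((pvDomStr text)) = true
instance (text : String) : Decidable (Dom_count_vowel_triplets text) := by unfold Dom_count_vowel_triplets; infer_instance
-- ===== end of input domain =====

-- B replaces A's overlapping 3-char window scan by a single pass maintaining the current
-- consecutive-vowel run length, adding max(0, run-2) per run (objective: alternative).

-- ===== PORT A =====
def count_vowel_triplets (text : String) : Int :=
  let cs := PySem.Chars.lower text.toList
  let vowels : List Char := "aeiouy".toList
  (PySem.List.pyRange 0 ((cs.length : Int) - 2) 1).foldl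
    (fun count i =>
      if PySem.List.pyGetD cs i ' ' ∈ vowels ∧
         PySem.List.pyGetD cs (i + 1) ' ' ∈ vowels ∧
         PySem.List.pyGetD cs (i + 2) ' ' ∈ vowels
      then count + 1 else count) 0

-- ===== PORT B =====
def count_vowel_triplets_alt (text : String) : Int :=
  let vowels : List Char := "aeiouy".toList
  let p := (PySem.Chars.lower text.toList).foldl
    (fun s c => if c ∈ vowels then (s.1, s.2 + 1) else (s.1 + max 0 (s.2 - 2), 0))
    ((0 : Int), (0 : Int))
  p.1 + max 0 (p.2 - 2)

-- ===== PRECONDITION & SPEC =====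
def Spec_count_vowel_triplets (text : String) (out : Int) : Prop := out = count_vowel_triplets_alt text
instance (text : String) (out : Int) : Decidable (Spec_count_vowel_triplets text out) := by unfold Spec_count_vowel_triplets; infer_instance

-- ===== CLAIM (what is proved, stated in full; the proofs are below) =====
def Claim_equal_count_vowel_triplets : Prop := ∀ (text : String), Dom_count_vowel_triplets text → Spec_count_vowel_triplets text (count_vowel_triplets text)

-- ===== LEMMAS AND PROOFS =====

def pvVowels : List Char := "aeiouy".toList

-- windows-from-the-front view of A's count
def pvWc : List Char → Int
  | a :: b :: c :: t =>
      (if a ∈ pvVowels ∧ b ∈ pvVowels ∧ c ∈ pvVowels then 1 else 0) + pvWc (b :: c :: t)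
  | _ => 0

-- per-character view: triples ending at each position, given r preceding consecutive vowels
def pvH (r : Int) : List Char → Int
  | [] => 0
  | c :: cs => if c ∈ pvVowels then (if 2 ≤ r then 1 else 0) + pvH (r + 1) cs else pvH 0 cs

theorem pvWc_cons_not {c : Char} (cs : List Char) (hc : c ∉ pvVowels) :
    pvWc (c :: cs) = pvWc cs := by
  match cs with
  | [] => rfl
  | [x] => rfl
  | x :: y :: t => simp [pvWc, hc]

theorem pvH_eq_wc : ∀ (cs p : List Char) (r : Int), 0 ≤ r → (∀ x ∈ p, x ∈ pvVowels) →
    (p.length : Int) = min r 2 → pvH r cs = pvWc (p ++ cs) := by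
  intro cs
  induction cs with
  | nil =>
      intro p r _ _ hlen
      have : p.length ≤ 2 := by omega
      match p, this with
      | [], _ => rfl
      | [x], _ => rfl
      | [x, y], _ => rfl
  | cons c cs ih =>
      intro p r hr hp hlen
      by_cases hc : c ∈ pvVowels
      · simp only [pvH, hc, if_pos]
        by_cases h2 : 2 ≤ r
        · have hl : p.length = 2 := by omega
          match p, hl with
          | [x, y], _ =>
            have hx : x ∈ pvVowels := hp x (by simp)
            have hy : y ∈ pvVowels := hp y (by simp)
            have := ih [y, c] (r + 1) (by omega)
              (by intro z hz; simp at hz; rcases hz with rfl | rfl <;> assumption)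
              (by simp; omega)
            simp only [List.cons_append, List.nil_append] at this ⊢
            rw [pvWc, if_pos h2, if_pos ⟨hx, hy, hc⟩, this]
        · by_cases h1 : r = 1
          · have hl : p.length = 1 := by omega
            match p, hl with
            | [x], _ =>
              have hx : x ∈ pvVowels := hp x (by simp)
              have := ih [x, c] (r + 1) (by omega)
                (by intro z hz; simp at hz; rcases hz with rfl | rfl <;> assumption)
                (by simp; omega)
              simp only [List.cons_append, List.nil_append] at this ⊢
              simp [h2, this]
          · have hr0 : r = 0 := by omega
            have hl : p.length = 0 := by omega
            match p, hl with
            | [], _ =>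
              have := ih [c] (r + 1) (by omega) (by intro z hz; simp at hz; simpa [hz])
                (by simp; omega)
              simp only [List.cons_append, List.nil_append] at this ⊢
              simp [h2, this]
      · simp only [pvH, hc, if_false]
        have hrec := ih [] 0 le_rfl (by intro z hz; simp at hz) (by simp)
        simp only [List.nil_append] at hrec
        rw [hrec]
        -- strip the all-vowel prefix p (length ≤ 2) and the non-vowel c
        have hl : p.length ≤ 2 := by omega
        match p, hl with
        | [], _ => exact (pvWc_cons_not cs hc).symm
        | [x], _ =>
            have h1 : pvWc (x :: c :: cs) = pvWc (c :: cs) := by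
              match cs with
              | [] => rfl
              | z :: t => simp [pvWc, hc]
            rw [List.cons_append, List.nil_append, h1, pvWc_cons_not cs hc]
        | [x, y], _ =>
            have h1 : pvWc (x :: y :: c :: cs) = pvWc (y :: c :: cs) := by
              simp [pvWc, hc]
            have h2 : pvWc (y :: c :: cs) = pvWc (c :: cs) := by
              match cs with
              | [] => rfl
              | z :: t => simp [pvWc, hc]
            simp only [List.cons_append, List.nil_append]
            rw [h1, h2, pvWc_cons_not cs hc]

theorem pvB_eq_h : ∀ (cs : List Char) (t r : Int), 0 ≤ r →
    (cs.foldl (fun s c => if c ∈ pvVowels then (s.1, s.2 + 1) else (s.1 + max 0 (s.2 - 2), 0)) (t, r)).1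
      + max 0 ((cs.foldl (fun s c => if c ∈ pvVowels then (s.1, s.2 + 1) else (s.1 + max 0 (s.2 - 2), 0)) (t, r)).2 - 2)
    = t + max 0 (r - 2) + pvH r cs := by
  intro cs
  induction cs with
  | nil => intro t r hr; simp [pvH]
  | cons c cs ih =>
      intro t r hr
      by_cases hc : c ∈ pvVowels
      · simp only [List.foldl_cons, hc, if_pos, pvH]
        rw [ih t (r + 1) (by omega)]
        by_cases h2 : 2 ≤ r
        · simp only [h2, if_pos]
          have : max 0 (r + 1 - 2) = max 0 (r - 2) + 1 := by omega
          omega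
        · simp only [h2, if_false]
          have h1 : max 0 (r + 1 - 2) = 0 := by omega
          have h0 : max 0 (r - 2) = 0 := by omega
          omega
      · simp only [List.foldl_cons, hc, if_false, pvH]
        rw [ih (t + max 0 (r - 2)) 0 le_rfl]
        have : max 0 ((0 : Int) - 2) = 0 := by decide
        omega

-- A's index loop as a countP over Nat.range, then equal to pvWc
theorem pvA_eq_countP (cs : List Char) :
    (PySem.List.pyRange 0 ((cs.length : Int) - 2) 1).foldl
      (fun count i =>
        if PySem.List.pyGetD cs i ' ' ∈ pvVowels ∧
           PySem.List.pyGetD cs (i + 1) ' ' ∈ pvVowels ∧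
           PySem.List.pyGetD cs (i + 2) ' ' ∈ pvVowels
        then count + 1 else count) 0
    = ((List.range (cs.length - 2)).countP
        (fun k => decide (cs.getD k ' ' ∈ pvVowels ∧ cs.getD (k + 1) ' ' ∈ pvVowels ∧
                          cs.getD (k + 2) ' ' ∈ pvVowels)) : Int) := by
  rw [PySem.List.foldl_ite_add_one]
  rw [PySem.List.pyRange_one]
  rw [List.countP_map]
  have hto : (((cs.length : Int) - 2 - 0).toNat) = cs.length - 2 := by omega
  rw [hto]
  simp only [zero_add]
  congr 1
  apply List.countP_congr
  intro k _
  have e1 : PySem.List.pyGetD cs ((k : Int)) ' ' = cs.getD k ' ' := by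
    simp [PySem.List.pyGetD_natCast]
  have e2 : PySem.List.pyGetD cs ((k : Int) + 1) ' ' = cs.getD (k + 1) ' ' := by
    have : ((k : Int) + 1) = ((k + 1 : Nat) : Int) := by push_cast; ring
    rw [this, PySem.List.pyGetD_natCast]
  have e3 : PySem.List.pyGetD cs ((k : Int) + 2) ' ' = cs.getD (k + 2) ' ' := by
    have : ((k : Int) + 2) = ((k + 2 : Nat) : Int) := by push_cast; ring
    rw [this, PySem.List.pyGetD_natCast]
  simp [e1, e2, e3]

theorem pvCountP_eq_wc : ∀ (cs : List Char),
    ((List.range (cs.length - 2)).countP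
        (fun k => decide (cs.getD k ' ' ∈ pvVowels ∧ cs.getD (k + 1) ' ' ∈ pvVowels ∧
                          cs.getD (k + 2) ' ' ∈ pvVowels)) : Int) = pvWc cs := by
  intro cs
  match cs with
  | [] => rfl
  | [a] => rfl
  | [a, b] => rfl
  | a :: b :: c :: t =>
      have hlen : (a :: b :: c :: t).length - 2 = t.length + 1 := by simp
      rw [hlen, List.range_succ_eq_map]
      rw [List.countP_cons, List.countP_map]
      have hrec := pvCountP_eq_wc (b :: c :: t)
      have hlen2 : (b :: c :: t).length - 2 = t.length := by simp
      rw [hlen2] at hrec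
      rw [pvWc]
      have hcongr : (List.range t.length).countP
          ((fun k => decide ((a :: b :: c :: t).getD k ' ' ∈ pvVowels ∧
              (a :: b :: c :: t).getD (k + 1) ' ' ∈ pvVowels ∧
              (a :: b :: c :: t).getD (k + 2) ' ' ∈ pvVowels)) ∘ Nat.succ)
          = (List.range t.length).countP
          (fun k => decide ((b :: c :: t).getD k ' ' ∈ pvVowels ∧
              (b :: c :: t).getD (k + 1) ' ' ∈ pvVowels ∧
              (b :: c :: t).getD (k + 2) ' ' ∈ pvVowels)) := by
        apply List.countP_congr
        intro k _
        simp [Function.comp]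
      rw [hcongr]
      by_cases hw : a ∈ pvVowels ∧ b ∈ pvVowels ∧ c ∈ pvVowels
      · have : decide ((a :: b :: c :: t).getD 0 ' ' ∈ pvVowels ∧
            (a :: b :: c :: t).getD 1 ' ' ∈ pvVowels ∧
            (a :: b :: c :: t).getD 2 ' ' ∈ pvVowels) = true := by
          simp [List.getD, hw.1, hw.2.1, hw.2.2]
        rw [this, if_pos hw, ← hrec]
        rw [if_pos (rfl : true = true)]
        push_cast
        omega
      · have : decide ((a :: b :: c :: t).getD 0 ' ' ∈ pvVowels ∧
            (a :: b :: c :: t).getD 1 ' ' ∈ pvVowels ∧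
            (a :: b :: c :: t).getD 2 ' ' ∈ pvVowels) = false := by
          simpa [List.getD] using hw
        rw [this, if_neg hw, ← hrec]
        rw [if_neg (by decide : ¬ (false = true))]
        push_cast
        omega

-- ===== VERDICT (by name: the statement is the Claim_ definition above) =====
theorem pvMain (cs : List Char) :
    (PySem.List.pyRange 0 ((cs.length : Int) - 2) 1).foldl
      (fun count i =>
        if PySem.List.pyGetD cs i ' ' ∈ pvVowels ∧
           PySem.List.pyGetD cs (i + 1) ' ' ∈ pvVowels ∧
           PySem.List.pyGetD cs (i + 2) ' ' ∈ pvVowels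
        then count + 1 else count) 0
    = (cs.foldl (fun s c => if c ∈ pvVowels then (s.1, s.2 + 1) else (s.1 + max 0 (s.2 - 2), 0))
        ((0 : Int), (0 : Int))).1
      + max 0 ((cs.foldl (fun s c => if c ∈ pvVowels then (s.1, s.2 + 1)
          else (s.1 + max 0 (s.2 - 2), 0)) ((0 : Int), (0 : Int))).2 - 2) := by
  have hA := (pvA_eq_countP cs).trans (pvCountP_eq_wc cs)
  have hB := pvB_eq_h cs 0 0 le_rfl
  have hBW := pvH_eq_wc cs [] 0 le_rfl (by intro z hz; simp at hz) (by simp)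
  simp only [List.nil_append] at hBW
  rw [hA, hB, hBW]
  norm_num

theorem count_vowel_triplets_spec : Claim_equal_count_vowel_triplets := by
  intro text _
  exact pvMain (PySem.Chars.lower text.toList)
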